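-- pv_equiv track=rewrite | github.com/Arpafaucon/sp | sp_admiral/src/obs_map/src/support.py | spiraling_coordinates_generator
-- ===== SOURCE A (Python) =====
-- def get_ring_coordinates(center_coord, ring_radius, array_dim):
--     """
--     list of coordinates of a Manhattan ring
--     coordinates are given clockwise
--
--     Args:
--         center_coord (tuple): [description]
--         ring_radius (int): [description]
--         array_dim (tuple): [description]
--
--     Returns:
--         [type]: [description]
--
--     Tests:
--     >>> get_ring_coordinates((5, 5), 2, (10, 10, 3))
--     [(3, 3), (3, 4), (3, 5), (3, 6), (3, 7), (4, 7), (5, 7), (6, 7), (7, 7), (7, 6), (7, 5), (7, 4), (7, 3), (6, 3), (5, 3), (4, 3)]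
--
--     # null radius
--     >>> get_ring_coordinates((5, 5), 0, (10, 10, 3))
--     [(5, 5)]
--
--     # corner
--     >>> get_ring_coordinates((0, 0), 2, (10, 10, 3))
--     [(0, 2), (1, 2), (2, 2), (2, 1), (2, 0)]
--
--     # flat image
--     >>> get_ring_coordinates((0, 0), 2, (10, 1, 3))
--     [(2, 0)]
--
--     >>> get_ring_coordinates((0,0), 2, (1,1,3))
--     []
--
--
--     """
--     assert len(
--         array_dim) >= 2, "expect at least two coordinates"
--     assert ring_radius >= 0
--     if ring_radius == 0:
--         return [center_coord]
--
--     h, w = array_dim[0:2]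
--     x, y = center_coord
--     top = [(x - ring_radius, y + j)
--            for j in range(-ring_radius, ring_radius+1)]
--     bottom = [(x + ring_radius, y - j)
--               for j in range(-ring_radius, ring_radius+1)]
--     left = [(x - i, y - ring_radius)
--             for i in range(-ring_radius+1, ring_radius)]
--     right = [(x + i, y + ring_radius)
--              for i in range(-ring_radius+1, ring_radius)]
--     total_nonfiltered = top + right + bottom + left
--     total_filtered = [(i, j) for i, j in total_nonfiltered if i >=
--                       0 and i < h and j >= 0 and j < w]
--     return total_filtered
--
-- def spiraling_coordinates_generator(array_dim):
--     """
--     generates an outwards coordinates spiral starting from the center and cropped at the boundaries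
--
--     Args:
--         array_dim (tuple[int, 2+]): dimensions of the array
--     """
--     h, w = array_dim[0:2]
--     center_line = int(h/2)
--     center_col = int(w/2)
--
--     max_ring = max(center_line, center_col)
--     for ring in range(max_ring+1):
--
--         cell_list_ring = get_ring_coordinates((center_line, center_col), ring, (h, w))
--         for cell in  cell_list_ring:
--             yield cell
-- ===== SOURCE B (Python) =====
-- def spiraling_coordinates_generator(array_dim):
--     h, w = array_dim[0:2]
--     cl = int(h / 2)
--     cc = int(w / 2)
--     for r in range(max(cl, cc) + 1):
--         if r == 0:
--             yield (cl, cc)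
--             continue
--         if 0 <= cl - r < h:            # top row, left to right
--             for j in range(max(cc - r, 0), min(cc + r, w - 1) + 1):
--                 yield (cl - r, j)
--         if 0 <= cc + r < w:            # right column, top to bottom (corners excluded)
--             for i in range(max(cl - r + 1, 0), min(cl + r - 1, h - 1) + 1):
--                 yield (i, cc + r)
--         if 0 <= cl + r < h:            # bottom row, right to left
--             for j in reversed(range(max(cc - r, 0), min(cc + r, w - 1) + 1)):
--                 yield (cl + r, j)
--         if 0 <= cc - r < w:            # left column, bottom to top (corners excluded)
--             for i in reversed(range(max(cl - r + 1, 0), min(cl + r - 1, h - 1) + 1)):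
--                 yield (i, cc - r)
-- ===== Notes on version B (the rewrite author's own statement) =====
-- stated objective: alternative
-- what changed: A builds every candidate cell of each Manhattan ring (4 sides of length 2r+1 even when far outside the array) and filters them afterwards; B clips each of the four per-ring segments' index ranges to the array bounds arithmetically and emits only in-bounds cells, skipping the generate-then-filter pass (intended as faster; a timing run measured ~1.8-2x but could not confirm at the largest size).
import Mathlib
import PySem

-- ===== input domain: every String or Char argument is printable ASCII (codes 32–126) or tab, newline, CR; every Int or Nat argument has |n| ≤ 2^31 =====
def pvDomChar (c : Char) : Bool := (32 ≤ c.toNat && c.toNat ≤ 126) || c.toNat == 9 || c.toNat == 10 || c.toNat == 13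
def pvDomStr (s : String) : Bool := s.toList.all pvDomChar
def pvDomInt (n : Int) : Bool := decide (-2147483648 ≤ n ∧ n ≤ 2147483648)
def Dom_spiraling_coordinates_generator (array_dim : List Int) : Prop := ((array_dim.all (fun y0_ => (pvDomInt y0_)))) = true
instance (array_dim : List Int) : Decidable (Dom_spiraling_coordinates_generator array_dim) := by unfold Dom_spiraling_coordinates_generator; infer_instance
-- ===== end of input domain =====

-- B replaces A's generate-all-ring-candidates-then-filter construction by per-ring index
-- ranges clipped to the array bounds, emitting only in-bounds cells (alternative construction;
-- intended as faster — measured ~1.8-2x on the sizes a timing run completed, unconfirmed at the largest).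


-- ===== PORT A =====
-- helper get_ring_coordinates (the asserts always hold at the call sites admitted by Pre_)
def pv_get_ring_coordinates (center_coord : Int × Int) (ring_radius : Int) (array_dim : Int × Int) :
    List (Int × Int) :=
  if ring_radius = 0 then [center_coord]
  else
    let h := array_dim.1
    let w := array_dim.2
    let x := center_coord.1
    let y := center_coord.2
    let top := (PySem.List.pyRange (-ring_radius) (ring_radius + 1) 1).map
      (fun j => (x - ring_radius, y + j))
    let bottom := (PySem.List.pyRange (-ring_radius) (ring_radius + 1) 1).map
      (fun j => (x + ring_radius, y - j))
    let left := (PySem.List.pyRange (-ring_radius + 1) ring_radius 1).map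
      (fun i => (x - i, y - ring_radius))
    let right := (PySem.List.pyRange (-ring_radius + 1) ring_radius 1).map
      (fun i => (x + i, y + ring_radius))
    let total_nonfiltered := top ++ right ++ bottom ++ left
    total_nonfiltered.filter
      (fun p => decide (0 ≤ p.1) && decide (p.1 < h) && decide (0 ≤ p.2) && decide (p.2 < w))

def spiraling_coordinates_generator (array_dim : List Int) : List (Int × Int) :=
  match array_dim with
  | h :: w :: _ =>
    -- int(h/2): exact truncating division for |h| ≤ 2^31 < 2^53 (stated in Dom_)
    let center_line := PySem.Int.truncdiv h 2
    let center_col := PySem.Int.truncdiv w 2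
    let max_ring := max center_line center_col
    (PySem.List.pyRange 0 (max_ring + 1) 1).foldl
      (fun acc ring => acc ++ pv_get_ring_coordinates (center_line, center_col) ring (h, w)) []
  | _ => []  -- Python raises ValueError unpacking here; excluded by Pre_

-- ===== PORT B =====
def spiraling_coordinates_generator_alt (array_dim : List Int) : List (Int × Int) :=
  match array_dim with
  | [] => []  -- Python raises ValueError unpacking here; excluded by Pre_
  | [_] => []  -- likewise
  | h :: w :: _ =>
    let cl := PySem.Int.truncdiv h 2
    let cc := PySem.Int.truncdiv w 2
    (PySem.List.pyRange 0 (max cl cc + 1) 1).foldl (fun acc r =>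
      if r = 0 then acc ++ [(cl, cc)]
      else
        let acc := if 0 ≤ cl - r ∧ cl - r < h then
            acc ++ (PySem.List.pyRange (max (cc - r) 0) (min (cc + r) (w - 1) + 1) 1).map
              (fun j => (cl - r, j))
          else acc
        let acc := if 0 ≤ cc + r ∧ cc + r < w then
            acc ++ (PySem.List.pyRange (max (cl - r + 1) 0) (min (cl + r - 1) (h - 1) + 1) 1).map
              (fun i => (i, cc + r))
          else acc
        let acc := if 0 ≤ cl + r ∧ cl + r < h then
            acc ++ ((PySem.List.pyRange (max (cc - r) 0) (min (cc + r) (w - 1) + 1) 1).reverse).map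
              (fun j => (cl + r, j))
          else acc
        if 0 ≤ cc - r ∧ cc - r < w then
            acc ++ ((PySem.List.pyRange (max (cl - r + 1) 0) (min (cl + r - 1) (h - 1) + 1) 1).reverse).map
              (fun i => (i, cc - r))
          else acc) []

-- ===== PRECONDITION & SPEC =====
-- Pre_ excludes only the inputs on which A raises: 'h, w = array_dim[0:2]' needs at least two entries.
def Pre_spiraling_coordinates_generator (array_dim : List Int) : Prop := 2 ≤ array_dim.length
instance (array_dim : List Int) : Decidable (Pre_spiraling_coordinates_generator array_dim) := by
  unfold Pre_spiraling_coordinates_generator; infer_instance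

def pvWitness_spiraling_coordinates_generator : List Int := [4, 5]

def Spec_spiraling_coordinates_generator (array_dim : List Int) (out : List (Int × Int)) : Prop :=
  out = spiraling_coordinates_generator_alt array_dim
instance (array_dim : List Int) (out : List (Int × Int)) :
    Decidable (Spec_spiraling_coordinates_generator array_dim out) := by
  unfold Spec_spiraling_coordinates_generator; infer_instance

-- ===== CLAIM (what is proved, stated in full; the proofs are below) =====
def Claim_equal_spiraling_coordinates_generator : Prop := ∀ (array_dim : List Int), Dom_spiraling_coordinates_generator array_dim → Pre_spiraling_coordinates_generator array_dim → Spec_spiraling_coordinates_generator array_dim (spiraling_coordinates_generator array_dim)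

-- ===== LEMMAS AND PROOFS =====

-- filter of an ascending unit range by an interval is the clipped range
lemma pv_filter_pyRange_interval (lo hi : Int) :
    ∀ (n : Nat) (a b : Int), (b - a).toNat = n →
      (PySem.List.pyRange a b 1).filter (fun t => decide (lo ≤ t) && decide (t < hi))
        = PySem.List.pyRange (max a lo) (min b hi) 1 := by
  intro n
  induction n with
  | zero =>
    intro a b hn
    rw [PySem.List.pyRange_one_eq_nil (by omega), PySem.List.pyRange_one_eq_nil (by omega)]
    rfl
  | succ m ih =>
    intro a b hn
    have hab : a < b := by omega
    rw [PySem.List.pyRange_one_cons hab, List.filter_cons]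
    by_cases hin : lo ≤ a ∧ a < hi
    · have hd : (decide (lo ≤ a) && decide (a < hi)) = true := by
        simp [hin.1, hin.2]
      rw [hd]
      have h1 : max a lo = a := by omega
      have h2 : a < min b hi := by omega
      rw [if_pos rfl, h1, PySem.List.pyRange_one_cons h2]
      have h3 : max (a + 1) lo = a + 1 := by omega
      rw [ih (a + 1) b (by omega), h3]
    · have hd : (decide (lo ≤ a) && decide (a < hi)) = false := by
        rcases not_and_or.mp hin with h | h <;> simp [h]
      rw [hd, if_neg (by simp)]
      rw [ih (a + 1) b (by omega)]
      by_cases hlo : a < lo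
      · have : max a lo = max (a + 1) lo := by omega
        rw [this]
      · have hhi : hi ≤ a := by omega
        rw [PySem.List.pyRange_one_eq_nil (by omega), PySem.List.pyRange_one_eq_nil (by omega)]

-- shifting an ascending unit range
lemma pv_map_add_pyRange (y a b : Int) :
    (PySem.List.pyRange a b 1).map (fun j => y + j)
      = PySem.List.pyRange (y + a) (y + b) 1 := by
  rw [PySem.List.pyRange_one, PySem.List.pyRange_one, List.map_map]
  have : (y + b - (y + a)).toNat = (b - a).toNat := by omega
  rw [this]
  apply List.map_congr_left
  intro k _
  simp [Function.comp]
  omega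

-- reflecting an ascending unit range: y - j runs downwards
lemma pv_map_sub_pyRange (y a b : Int) :
    (PySem.List.pyRange a b 1).map (fun j => y - j)
      = (PySem.List.pyRange (y - b + 1) (y - a + 1) 1).reverse := by
  rw [← PySem.List.pyRange_neg_one_eq_reverse, PySem.List.pyRange_one,
    PySem.List.pyRange_neg_one, List.map_map]
  have : (y - a - (y - b)).toNat = (b - a).toNat := by omega
  rw [this]
  apply List.map_congr_left
  intro k _
  simp [Function.comp]
  omega

-- a filtered row/column segment with constant coordinate c: pull the pairing out of the filter
lemma pv_filter_map_pair {f : Int → Int} (c : Int) (q : Int × Int → Bool) (l : List Int) :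
    (l.map (fun j => (c, f j))).filter q
      = ((l.map f).filter (fun t => q (c, t))).map (fun t => (c, t)) := by
  induction l with
  | nil => rfl
  | cons x xs ih =>
    simp only [List.map_cons, List.filter_cons]
    by_cases hq : q (c, f x) = true
    · simp [hq, ih]
    · simp only [Bool.not_eq_true] at hq
      simp [hq, ih]

lemma pv_filter_map_pair' {f : Int → Int} (c : Int) (q : Int × Int → Bool) (l : List Int) :
    (l.map (fun j => (f j, c))).filter q
      = ((l.map f).filter (fun t => q (t, c))).map (fun t => (t, c)) := by
  induction l with
  | nil => rfl
  | cons x xs ih =>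
    simp only [List.map_cons, List.filter_cons]
    by_cases hq : q (f x, c) = true
    · simp [hq, ih]
    · simp only [Bool.not_eq_true] at hq
      simp [hq, ih]

-- the in-bounds filter used by A
def pvInB (h w : Int) (p : Int × Int) : Bool :=
  decide (0 ≤ p.1) && decide (p.1 < h) && decide (0 ≤ p.2) && decide (p.2 < w)

-- row segment, ascending second coordinate
lemma pv_seg_row_asc (c y h w a b : Int) :
    ((PySem.List.pyRange a b 1).map (fun j => (c, y + j))).filter (pvInB h w)
      = if 0 ≤ c ∧ c < h then
          (PySem.List.pyRange (max (y + a) 0) (min (y + b) w) 1).map (fun t => (c, t))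
        else [] := by
  rw [pv_filter_map_pair c (pvInB h w), pv_map_add_pyRange]
  by_cases hc : 0 ≤ c ∧ c < h
  · rw [if_pos hc]
    congr 1
    have : (fun t => pvInB h w (c, t)) = (fun t => decide (0 ≤ t) && decide (t < w)) := by
      funext t; simp [pvInB, hc.1, hc.2]
    rw [this, pv_filter_pyRange_interval 0 w _ (y + a) (y + b) rfl]
  · rw [if_neg hc]
    rw [List.filter_eq_nil_iff.mpr, List.map_nil]
    intro t _
    simp only [pvInB, Bool.and_eq_true, decide_eq_true_eq]
    omega

-- row segment, descending second coordinate
lemma pv_seg_row_desc (c y h w a b : Int) :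
    ((PySem.List.pyRange a b 1).map (fun j => (c, y - j))).filter (pvInB h w)
      = if 0 ≤ c ∧ c < h then
          ((PySem.List.pyRange (max (y - b + 1) 0) (min (y - a + 1) w) 1).reverse).map
            (fun t => (c, t))
        else [] := by
  rw [pv_filter_map_pair c (pvInB h w), pv_map_sub_pyRange, List.filter_reverse]
  by_cases hc : 0 ≤ c ∧ c < h
  · rw [if_pos hc]
    congr 2
    have : (fun t => pvInB h w (c, t)) = (fun t => decide (0 ≤ t) && decide (t < w)) := by
      funext t; simp [pvInB, hc.1, hc.2]
    rw [this, pv_filter_pyRange_interval 0 w _ (y - b + 1) (y - a + 1) rfl]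
  · rw [if_neg hc]
    rw [List.filter_eq_nil_iff.mpr, List.reverse_nil, List.map_nil]
    intro t _
    simp only [pvInB, Bool.and_eq_true, decide_eq_true_eq]
    omega

-- column segment, ascending first coordinate
lemma pv_seg_col_asc (d x h w a b : Int) :
    ((PySem.List.pyRange a b 1).map (fun i => (x + i, d))).filter (pvInB h w)
      = if 0 ≤ d ∧ d < w then
          (PySem.List.pyRange (max (x + a) 0) (min (x + b) h) 1).map (fun t => (t, d))
        else [] := by
  rw [pv_filter_map_pair' d (pvInB h w), pv_map_add_pyRange]
  by_cases hd : 0 ≤ d ∧ d < w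
  · rw [if_pos hd]
    congr 1
    have : (fun t => pvInB h w (t, d)) = (fun t => decide (0 ≤ t) && decide (t < h)) := by
      funext t; simp [pvInB, hd.1, hd.2, Bool.and_comm]
    rw [this, pv_filter_pyRange_interval 0 h _ (x + a) (x + b) rfl]
  · rw [if_neg hd]
    rw [List.filter_eq_nil_iff.mpr, List.map_nil]
    intro t _
    simp only [pvInB, Bool.and_eq_true, decide_eq_true_eq]
    omega

-- column segment, descending first coordinate
lemma pv_seg_col_desc (d x h w a b : Int) :
    ((PySem.List.pyRange a b 1).map (fun i => (x - i, d))).filter (pvInB h w)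
      = if 0 ≤ d ∧ d < w then
          ((PySem.List.pyRange (max (x - b + 1) 0) (min (x - a + 1) h) 1).reverse).map
            (fun t => (t, d))
        else [] := by
  rw [pv_filter_map_pair' d (pvInB h w), pv_map_sub_pyRange, List.filter_reverse]
  by_cases hd : 0 ≤ d ∧ d < w
  · rw [if_pos hd]
    congr 2
    have : (fun t => pvInB h w (t, d)) = (fun t => decide (0 ≤ t) && decide (t < h)) := by
      funext t; simp [pvInB, hd.1, hd.2, Bool.and_comm]
    rw [this, pv_filter_pyRange_interval 0 h _ (x - b + 1) (x - a + 1) rfl]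
  · rw [if_neg hd]
    rw [List.filter_eq_nil_iff.mpr, List.reverse_nil, List.map_nil]
    intro t _
    simp only [pvInB, Bool.and_eq_true, decide_eq_true_eq]
    omega

-- one positive-radius ring of A equals B's four clipped segments
lemma pv_ring_eq (h w cl cc r : Int) (hr : 0 < r) :
    pv_get_ring_coordinates (cl, cc) r (h, w)
      = (if 0 ≤ cl - r ∧ cl - r < h then
            (PySem.List.pyRange (max (cc - r) 0) (min (cc + r) (w - 1) + 1) 1).map
              (fun j => (cl - r, j))
          else [])
      ++ (if 0 ≤ cc + r ∧ cc + r < w then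
            (PySem.List.pyRange (max (cl - r + 1) 0) (min (cl + r - 1) (h - 1) + 1) 1).map
              (fun i => (i, cc + r))
          else [])
      ++ (if 0 ≤ cl + r ∧ cl + r < h then
            ((PySem.List.pyRange (max (cc - r) 0) (min (cc + r) (w - 1) + 1) 1).reverse).map
              (fun j => (cl + r, j))
          else [])
      ++ (if 0 ≤ cc - r ∧ cc - r < w then
            ((PySem.List.pyRange (max (cl - r + 1) 0) (min (cl + r - 1) (h - 1) + 1) 1).reverse).map
              (fun i => (i, cc - r))
          else []) := by
  unfold pv_get_ring_coordinates
  rw [if_neg (by omega)]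
  simp only [List.filter_append]
  have hP : (fun p : Int × Int => decide (0 ≤ p.1) && decide (p.1 < h) && decide (0 ≤ p.2) && decide (p.2 < w)) = pvInB h w := rfl
  rw [hP]
  have e1 : min (cc + (r + 1)) w = min (cc + r) (w - 1) + 1 := by omega
  have e2 : min (cl + r) h = min (cl + r - 1) (h - 1) + 1 := by omega
  have e3 : min (cc - (-r) + 1) w = min (cc + r) (w - 1) + 1 := by omega
  have e4 : min (cl - (-r + 1) + 1) h = min (cl + r - 1) (h - 1) + 1 := by omega
  have f1 : max (cc + -r) 0 = max (cc - r) 0 := by omega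
  have f3 : max (cc - (r + 1) + 1) 0 = max (cc - r) 0 := by omega
  have f2 : max (cl + (-r + 1)) 0 = max (cl - r + 1) 0 := by omega
  have htop := pv_seg_row_asc (cl - r) cc h w (-r) (r + 1)
  have hright := pv_seg_col_asc (cc + r) cl h w (-r + 1) r
  have hbottom := pv_seg_row_desc (cl + r) cc h w (-r) (r + 1)
  have hleft := pv_seg_col_desc (cc - r) cl h w (-r + 1) r
  rw [htop, hright, hbottom, hleft, e1, e2, e3, e4, f1, f2, f3]

-- ===== VERDICT (by name: the statement is the Claim_ definition above) =====
theorem spiraling_coordinates_generator_spec : Claim_equal_spiraling_coordinates_generator := by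
  intro array_dim _ hpre
  unfold Spec_spiraling_coordinates_generator
  match array_dim with
  | [] => exact absurd hpre (by simp [Pre_spiraling_coordinates_generator])
  | [_] => exact absurd hpre (by simp [Pre_spiraling_coordinates_generator])
  | h :: w :: rest =>
    simp only [spiraling_coordinates_generator, spiraling_coordinates_generator_alt]
    apply PySem.List.foldl_congr_mem
    intro acc r hmem
    have hr0 : 0 ≤ r := (PySem.List.mem_pyRange_one.mp hmem).1
    by_cases h0 : r = 0
    · subst h0
      rw [if_pos rfl]
      unfold pv_get_ring_coordinates
      rw [if_pos rfl]
    · rw [if_neg h0]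
      rw [pv_ring_eq h w _ _ r (by omega)]
      split_ifs <;> simp [List.append_assoc]
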